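-- pv_equiv track=rewrite | github.com/kim366/Birds-Solver | birds_solver.py | merge_solutions
-- ===== SOURCE A (Python) =====
-- def merge_solutions(a, b, num_birds):
--     solution = []
--     seen_birds = set()
--     for x, y in zip(a, b):
--         if (x and y and x != y) or (x and x in seen_birds) or (y and y in seen_birds):
--             return None
--         seen_birds.update((x, y))
--         solution.append(x or y)
--
--     return solution
-- ===== SOURCE B (Python) =====
-- def merge_solutions(a, b, num_birds):
--     # Pass 1: same-position conflicts + construct the merged assignment.
--     merged = []
--     for x, y in zip(a, b):
--         if x and y and x != y:
--             return None
--         merged.append(x or y)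
--     # Pass 2: cross-position reuse of a truthy bird value.
--     seen = set()
--     for v in merged:
--         if v:
--             if v in seen:
--                 return None
--             seen.add(v)
--     return merged
-- ===== Notes on version B (the rewrite author's own statement) =====
-- stated objective: simpler
-- what changed: Replaces the single loop threading a seen-set of both inputs with two separate passes: one zip pass that detects same-position conflicts and builds the merged list, then a scan over the merged list with a fresh set that detects cross-position reuse.
import Mathlib
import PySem

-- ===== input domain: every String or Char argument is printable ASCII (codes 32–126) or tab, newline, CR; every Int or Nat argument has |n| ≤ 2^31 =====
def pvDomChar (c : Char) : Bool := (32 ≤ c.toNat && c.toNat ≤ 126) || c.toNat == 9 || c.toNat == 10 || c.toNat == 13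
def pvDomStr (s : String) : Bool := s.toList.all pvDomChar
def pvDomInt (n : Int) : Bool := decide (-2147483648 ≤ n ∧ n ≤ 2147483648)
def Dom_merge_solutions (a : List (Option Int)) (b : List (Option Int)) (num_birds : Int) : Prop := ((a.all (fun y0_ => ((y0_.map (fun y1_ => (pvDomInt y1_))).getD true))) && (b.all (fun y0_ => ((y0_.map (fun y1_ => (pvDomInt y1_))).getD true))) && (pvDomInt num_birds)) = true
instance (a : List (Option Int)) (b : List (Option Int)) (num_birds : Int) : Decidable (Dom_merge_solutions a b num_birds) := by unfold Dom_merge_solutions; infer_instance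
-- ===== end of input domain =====

-- B splits A's single seen-set loop into two passes (same-position merge, then cross-position
-- duplicate scan over the merged list); objective: simpler decomposition, same O(n) cost.


-- Python truthiness of an Optional[int]: None and 0 are falsy.
def pyTruthy (o : Option Int) : Bool :=
  match o with
  | none => false
  | some n => decide (n ≠ 0)

-- Python 'x or y' on Optional[int] values.
def pyOr (x y : Option Int) : Option Int := if pyTruthy x then x else y

-- ===== PORT A =====
-- the for-loop of A over zip(a,b), carrying (solution, seen_birds)
def mergeALoop : List (Option Int × Option Int) → List (Option Int) → PySem.Set (Option Int) →
    Option (List (Option Int))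
  | [], sol, _ => some sol
  | (x, y) :: rest, sol, seen =>
    if (pyTruthy x ∧ pyTruthy y ∧ x ≠ y) ∨ (pyTruthy x ∧ x ∈ seen) ∨ (pyTruthy y ∧ y ∈ seen) then
      none
    else
      mergeALoop rest (sol ++ [pyOr x y]) (PySem.Set.update seen [x, y])

def merge_solutions (a : List (Option Int)) (b : List (Option Int)) (num_birds : Int) :
    Option (List (Option Int)) :=
  mergeALoop (a.zip b) [] PySem.Set.empty

-- ===== PORT B =====
-- pass 1: same-position conflicts + building merged
def mergePass1 : List (Option Int × Option Int) → Option (List (Option Int))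
  | [] => some []
  | (x, y) :: rest =>
    if pyTruthy x ∧ pyTruthy y ∧ x ≠ y then none
    else (mergePass1 rest).map (fun m => pyOr x y :: m)

-- pass 2: true iff some truthy value occurs twice (returns the 'return None' decision)
def dupPass : List (Option Int) → PySem.Set (Option Int) → Bool
  | [], _ => false
  | v :: rest, seen =>
    if pyTruthy v then
      if v ∈ seen then true else dupPass rest (PySem.Set.add seen v)
    else dupPass rest seen

def merge_solutions_alt (a : List (Option Int)) (b : List (Option Int)) (num_birds : Int) :
    Option (List (Option Int)) :=
  match mergePass1 (a.zip b) with
  | none => none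
  | some merged => if dupPass merged PySem.Set.empty then none else some merged

-- ===== PRECONDITION & SPEC =====
def Spec_merge_solutions (a : List (Option Int)) (b : List (Option Int)) (num_birds : Int) (out : Option (List (Option Int))) : Prop := out = merge_solutions_alt a b num_birds
instance (a : List (Option Int)) (b : List (Option Int)) (num_birds : Int) (out : Option (List (Option Int))) : Decidable (Spec_merge_solutions a b num_birds out) := by unfold Spec_merge_solutions; infer_instance

-- ===== CLAIM (what is proved, stated in full; the proofs are below) =====
def Claim_equal_merge_solutions : Prop := ∀ (a : List (Option Int)) (b : List (Option Int)) (num_birds : Int), Dom_merge_solutions a b num_birds → Spec_merge_solutions a b num_birds (merge_solutions a b num_birds)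

-- ===== LEMMAS AND PROOFS =====

theorem mem_update_pair {x y v : Option Int} {s : PySem.Set (Option Int)} :
    v ∈ PySem.Set.update s [x, y] ↔ v ∈ s ∨ v = x ∨ v = y := by
  simp [PySem.Set.update, PySem.Set.mem_add, or_assoc]

-- Main loop invariant: if two seen-sets agree on truthy membership, A's loop from (sol, seenA)
-- equals pass1-then-pass2 from seenB, prefixed by sol.
theorem mergeALoop_eq (ps : List (Option Int × Option Int)) :
    ∀ (sol : List (Option Int)) (seenA seenB : PySem.Set (Option Int)),
    (∀ v, pyTruthy v → (v ∈ seenA ↔ v ∈ seenB)) →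
    mergeALoop ps sol seenA =
      (match mergePass1 ps with
       | none => none
       | some m => if dupPass m seenB then none else some (sol ++ m)) := by
  induction ps with
  | nil => intro sol seenA seenB _; simp [mergeALoop, mergePass1, dupPass]
  | cons p rest ih =>
    obtain ⟨x, y⟩ := p
    intro sol seenA seenB hagree
    by_cases hsame : pyTruthy x ∧ pyTruthy y ∧ x ≠ y
    · simp [mergeALoop, mergePass1, hsame]
    · by_cases hx : pyTruthy x ∧ x ∈ seenA
      · -- A returns None; B: head of merged is x (truthy, already in seenB)
        have hxB : x ∈ seenB := (hagree x hx.1).mp hx.2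
        simp only [mergeALoop, mergePass1, if_neg hsame, if_pos (Or.inr (Or.inl hx))]
        cases hm : mergePass1 rest with
        | none => simp
        | some m =>
          simp only [Option.map_some]
          have : pyOr x y = x := by simp [pyOr, hx.1]
          simp [dupPass, this, hx.1, hxB]
      · by_cases hy : pyTruthy y ∧ y ∈ seenA
        · have hyB : y ∈ seenB := (hagree y hy.1).mp hy.2
          simp only [mergeALoop, mergePass1, if_neg hsame, if_pos (Or.inr (Or.inr hy))]
          cases hm : mergePass1 rest with
          | none => simp
          | some m =>
            simp only [Option.map_some]
            by_cases htx : pyTruthy x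
            · -- both truthy and no same-position conflict ⇒ x = y
              have hxy : x = y := by
                by_contra hne
                exact hsame ⟨htx, hy.1, hne⟩
              have : pyOr x y = y := by simp [pyOr, htx, hxy]
              simp [dupPass, this, hy.1, hyB]
            · have : pyOr x y = y := by simp [pyOr, htx]
              simp [dupPass, this, hy.1, hyB]
        · -- no conflict at this position: both loops advance
          have hguard : ¬ ((pyTruthy x ∧ pyTruthy y ∧ x ≠ y) ∨ (pyTruthy x ∧ x ∈ seenA) ∨ (pyTruthy y ∧ y ∈ seenA)) := by
            rintro (h | h | h) <;> [exact hsame h; exact hx h; exact hy h]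
          simp only [mergeALoop, if_neg hguard, mergePass1, if_neg hsame]
          by_cases htv : pyTruthy (pyOr x y)
          · -- the merged value v is truthy and fresh; seen sets stay in agreement
            have hv_cases : pyOr x y = x ∨ pyOr x y = y := by
              unfold pyOr; split <;> simp
            have hvB : pyOr x y ∉ seenB := by
              intro hmem
              rcases hv_cases with hvx | hvy
              · exact hx ⟨hvx ▸ htv, (hagree x (hvx ▸ htv)).mpr (hvx ▸ hmem)⟩
              · exact hy ⟨hvy ▸ htv, (hagree y (hvy ▸ htv)).mpr (hvy ▸ hmem)⟩
            have hagree' : ∀ v, pyTruthy v →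
                (v ∈ PySem.Set.update seenA [x, y] ↔ v ∈ PySem.Set.add seenB (pyOr x y)) := by
              intro v hv
              rw [mem_update_pair, PySem.Set.mem_add]
              constructor
              · rintro (h | h | h)
                · exact Or.inl ((hagree v hv).mp h)
                · have htx : pyTruthy x := h ▸ hv
                  right; simp [pyOr, htx, h]
                · have hty : pyTruthy y := h ▸ hv
                  by_cases htx : pyTruthy x
                  · have hxy : x = y := by
                      by_contra hne; exact hsame ⟨htx, hty, hne⟩
                    right; simp [pyOr, htx, hxy, h]
                  · right; simp [pyOr, htx, h]
              · rintro (h | h)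
                · exact Or.inl ((hagree v hv).mpr h)
                · rcases hv_cases with hvx | hvy
                  · exact Or.inr (Or.inl (h.trans hvx))
                  · exact Or.inr (Or.inr (h.trans hvy))
            rw [ih (sol ++ [pyOr x y]) _ _ hagree']
            cases hm : mergePass1 rest with
            | none => simp
            | some m => simp [dupPass, htv, hvB]
          · -- merged value falsy: x and y are both falsy, nothing truthy is added
            have htx : ¬ pyTruthy x := by
              intro h; exact htv (by simpa [pyOr, h] using h)
            have hty : ¬ pyTruthy y := by
              intro h; exact htv (by simpa [pyOr, htx] using h)
            have hagree' : ∀ v, pyTruthy v →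
                (v ∈ PySem.Set.update seenA [x, y] ↔ v ∈ seenB) := by
              intro v hv
              rw [mem_update_pair]
              constructor
              · rintro (h | h | h)
                · exact (hagree v hv).mp h
                · exact absurd (h ▸ hv) htx
                · exact absurd (h ▸ hv) hty
              · intro h; exact Or.inl ((hagree v hv).mpr h)
            rw [ih (sol ++ [pyOr x y]) _ _ hagree']
            cases hm : mergePass1 rest with
            | none => simp
            | some m => simp [dupPass, htv]

-- ===== VERDICT (by name: the statement is the Claim_ definition above) =====
theorem merge_solutions_spec : Claim_equal_merge_solutions := by
  intro a b num_birds _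
  unfold Spec_merge_solutions merge_solutions merge_solutions_alt
  rw [mergeALoop_eq (a.zip b) [] PySem.Set.empty PySem.Set.empty (fun v _ => Iff.rfl)]
  cases mergePass1 (a.zip b) <;> simp
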